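-- pv_equiv track=rewrite | github.com/minvws/gfmodules-mcsd-update-client | ITI-130/iti130_publisher.py | _order_fhir_resource_types_for_delete
-- ===== SOURCE A (Python) =====
-- from typing import Any, Dict, Iterable, List, Optional, Set, Tuple
--
-- FHIR_RESET_DELETE_ORDER: Tuple[str, ...] = (
--     "PractitionerRole",
--     "HealthcareService",
--     "Location",
--     "OrganizationAffiliation",
--     "Practitioner",
--     "Endpoint",
--     "Organization",
-- )
--
-- def _order_fhir_resource_types_for_delete(resource_types: Iterable[str]) -> List[str]:
--     unique: List[str] = []
--     seen: Set[str] = set()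
--     for rtype in resource_types:
--         rstr = str(rtype or "").strip()
--         if not rstr or rstr in seen:
--             continue
--         unique.append(rstr)
--         seen.add(rstr)
--
--     if not unique:
--         return []
--
--     order_set = set(FHIR_RESET_DELETE_ORDER)
--     priority = [rtype for rtype in FHIR_RESET_DELETE_ORDER if rtype in seen]
--     rest = [rtype for rtype in unique if rtype not in order_set]
--     return priority + rest
-- ===== SOURCE B (Python) =====
-- from typing import Iterable, List, Tuple
--
-- FHIR_RESET_DELETE_ORDER: Tuple[str, ...] = (
--     "PractitionerRole",
--     "HealthcareService",
--     "Location",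
--     "OrganizationAffiliation",
--     "Practitioner",
--     "Endpoint",
--     "Organization",
-- )
--
--
-- def _order_fhir_resource_types_for_delete(resource_types: Iterable[str]) -> List[str]:
--     # Ordered dedupe via dict.fromkeys, then ONE stable sort keyed by a priority-index
--     # table (non-priority names share the fallback rank, so stability keeps their
--     # first-occurrence order) -- instead of A's separate priority/rest partition passes.
--     unique = dict.fromkeys(
--         n for n in (str(r or "").strip() for r in resource_types) if n
--     )
--     rank = {name: i for i, name in enumerate(FHIR_RESET_DELETE_ORDER)}
--     fallback = len(FHIR_RESET_DELETE_ORDER)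
--     return sorted(unique, key=lambda n: rank.get(n, fallback))
-- ===== Notes on version B (the rewrite author's own statement) =====
-- stated objective: alternative
-- what changed: B dedupes with dict.fromkeys and then produces the whole result by ONE stable sort keyed by a precomputed priority-index table (ties at the fallback rank preserve first-occurrence order), replacing A's explicit priority/rest partition built by two separate filtering passes.
import Mathlib
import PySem

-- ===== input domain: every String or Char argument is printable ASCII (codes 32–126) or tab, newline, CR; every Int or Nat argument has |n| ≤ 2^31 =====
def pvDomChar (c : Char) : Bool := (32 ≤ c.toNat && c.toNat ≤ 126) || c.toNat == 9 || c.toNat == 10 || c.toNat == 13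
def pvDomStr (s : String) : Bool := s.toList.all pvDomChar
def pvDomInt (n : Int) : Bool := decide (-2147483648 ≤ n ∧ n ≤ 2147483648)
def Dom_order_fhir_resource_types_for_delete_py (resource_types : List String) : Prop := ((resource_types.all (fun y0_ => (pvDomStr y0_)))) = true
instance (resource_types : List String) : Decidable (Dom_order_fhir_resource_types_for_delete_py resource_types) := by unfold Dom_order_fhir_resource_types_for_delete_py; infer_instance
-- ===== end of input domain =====

-- B replaces A's explicit priority/rest partition (two filtering passes) by ONE stable
-- sort of the deduped list keyed by a priority-index table; return value proved identical.

def fhirResetDeleteOrder : List String :=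
  ["PractitionerRole", "HealthcareService", "Location", "OrganizationAffiliation",
   "Practitioner", "Endpoint", "Organization"]

-- ===== PORT A =====
-- loop body of A's dedupe loop; state = (unique, seen)
def fhirStepA (st : List String × PySem.Set String) (rtype : String) :
    List String × PySem.Set String :=
  let rstr := PySem.Str.strip (if rtype == "" then "" else rtype)
  if rstr == "" || PySem.Set.contains st.2 rstr then st
  else (st.1 ++ [rstr], PySem.Set.add st.2 rstr)

def order_fhir_resource_types_for_delete_py (resource_types : List String) : List String :=
  let st := resource_types.foldl fhirStepA ([], PySem.Set.empty)
  if st.1 == [] then []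
  else
    let order_set := PySem.Set.ofList fhirResetDeleteOrder
    let priority := fhirResetDeleteOrder.filter (fun rtype => PySem.Set.contains st.2 rtype)
    let rest := st.1.filter (fun rtype => !PySem.Set.contains order_set rtype)
    priority ++ rest

-- ===== PORT B =====
-- str(r or "").strip()
def fhirNorm (r : String) : String := PySem.Str.strip (if r == "" then "" else r)

-- rank = {name: i for i, name in enumerate(FHIR_RESET_DELETE_ORDER)}
def fhirRank : PySem.Dict String Int :=
  (PySem.List.enumerate fhirResetDeleteOrder).foldl
    (fun d p => PySem.Dict.insert d p.2 p.1) PySem.Dict.empty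

-- lambda n: rank.get(n, fallback), with fallback = len(FHIR_RESET_DELETE_ORDER)
def fhirKey (n : String) : Int :=
  PySem.Dict.getD fhirRank n (fhirResetDeleteOrder.length : Int)

def order_fhir_resource_types_for_delete_py_alt (resource_types : List String) : List String :=
  let unique := PySem.List.dedup ((resource_types.map fhirNorm).filter (fun n => !(n == "")))
  PySem.List.sorted unique fhirKey

-- ===== PRECONDITION & SPEC =====
def Spec_order_fhir_resource_types_for_delete_py (resource_types : List String) (out : List String) : Prop := out = order_fhir_resource_types_for_delete_py_alt resource_types
instance (resource_types : List String) (out : List String) : Decidable (Spec_order_fhir_resource_types_for_delete_py resource_types out) := by unfold Spec_order_fhir_resource_types_for_delete_py; infer_instance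

-- ===== CLAIM (what is proved, stated in full; the proofs are below) =====
def Claim_equal_order_fhir_resource_types_for_delete_py : Prop := ∀ (resource_types : List String), Dom_order_fhir_resource_types_for_delete_py resource_types → Spec_order_fhir_resource_types_for_delete_py resource_types (order_fhir_resource_types_for_delete_py resource_types)

-- ===== LEMMAS AND PROOFS =====

-- key values: < 7 exactly on the priority names, 7 elsewhere
theorem fhirKey_lt_of_mem {y : String} (h : y ∈ fhirResetDeleteOrder) :
    fhirKey y < 7 := by
  fin_cases h <;> decide

theorem fhirKey_eq_of_not_mem {y : String} (h : y ∉ fhirResetDeleteOrder) :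
    fhirKey y = 7 := by
  simp only [fhirResetDeleteOrder, List.mem_cons, List.not_mem_nil, or_false, not_or] at h
  obtain ⟨h1, h2, h3, h4, h5, h6, h7⟩ := h
  simp [fhirKey, fhirRank, fhirResetDeleteOrder, PySem.List.enumerate_cons,
    PySem.Dict.getD, PySem.Dict.get?, PySem.Dict.insert, PySem.Dict.empty,
    Ne.symm h1, Ne.symm h2, Ne.symm h3, Ne.symm h4, Ne.symm h5, Ne.symm h6, Ne.symm h7]

theorem fhirKey_le (y : String) : fhirKey y ≤ 7 := by
  by_cases h : y ∈ fhirResetDeleteOrder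
  · exact le_of_lt (fhirKey_lt_of_mem h)
  · exact le_of_eq (fhirKey_eq_of_not_mem h)

theorem fhirOrder_pairwise :
    fhirResetDeleteOrder.Pairwise (fun a b => fhirKey a < fhirKey b) := by
  decide

-- insertBy goes in front when x precedes every element
theorem insertBy_of_forall_before (before : String → String → Bool) (x : String)
    (ys : List String) (h : ∀ y ∈ ys, before x y = true) :
    PySem.List.insertBy before x ys = x :: ys := by
  cases ys with
  | nil => rfl
  | cons y ys => simp [PySem.List.insertBy, h y (by simp)]

-- inserting a new priority name x into (ord.filter S ++ rest) lands at its rank position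
theorem fhir_ins_prio (ord : List String)
    (hord : ord.Pairwise (fun a b => fhirKey a < fhirKey b)) :
    ∀ (rest : List String) (x : String), (∀ y ∈ rest, fhirKey x < fhirKey y) →
    x ∈ ord → ∀ (S : String → Bool), S x = false →
    PySem.List.insertBy (fun a b => decide (fhirKey a < fhirKey b)) x (ord.filter S ++ rest)
      = ord.filter (fun y => S y || y == x) ++ rest := by
  induction ord with
  | nil => intro rest x _ hx; exact absurd hx (by simp)
  | cons a ord ih =>
    intro rest x hrest hx S hSx
    rw [List.pairwise_cons] at hord
    obtain ⟨ha, hord'⟩ := hord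
    rcases List.mem_cons.mp hx with hxa | hx'
    · -- x is the head: S drops it on the left, the new predicate keeps it first
      subst hxa
      have hfilt : List.filter (fun y => S y || y == x) ord = List.filter S ord := by
        apply List.filter_congr
        intro y hy
        have : (y == x) = false := by
          have hlt := ha y hy
          simp only [beq_eq_false_iff_ne]
          intro he; subst he; exact absurd hlt (lt_irrefl _)
        simp [this]
      simp only [List.filter_cons, hSx, beq_self_eq_true, Bool.or_true, if_true,
        Bool.false_eq_true, if_false, hfilt]
      apply insertBy_of_forall_before
      intro y hy
      rcases List.mem_append.mp hy with hy | hy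
      · have := List.mem_filter.mp hy
        exact decide_eq_true (ha y this.1)
      · exact decide_eq_true (hrest y hy)
    · -- x is further down: the head a stays put (fhirKey a < fhirKey x)
      have hax : fhirKey a < fhirKey x := ha x hx'
      have haxne : (a == x) = false := by
        simp only [beq_eq_false_iff_ne]; intro he; subst he; exact absurd hax (lt_irrefl _)
      have hbefore : (decide (fhirKey x < fhirKey a)) = false := by
        simp only [decide_eq_false_iff_not]; exact not_lt.mpr (le_of_lt hax)
      by_cases hSa : S a = true
      · simp only [List.filter_cons, hSa, Bool.true_or, if_true, List.cons_append,
          PySem.List.insertBy, hbefore, Bool.false_eq_true, if_false]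
        rw [ih hord' rest x hrest hx' S hSx]
      · have hSa' : S a = false := by
          simp only [Bool.not_eq_true] at hSa
          exact hSa
        simp only [List.filter_cons, hSa', haxne, Bool.or_self, Bool.false_eq_true, if_false]
        exact ih hord' rest x hrest hx' S hSx

-- the stable insertion-sort fold over a nodup list builds A's priority ++ rest shape
theorem fhir_fold_ins (u : List String) : ∀ (pre : List String), (pre ++ u).Nodup →
    u.foldl (fun acc x => PySem.List.insertBy (fun a b => decide (fhirKey a < fhirKey b)) x acc)
        (fhirResetDeleteOrder.filter (fun y => decide (y ∈ pre))
          ++ pre.filter (fun y => !decide (y ∈ fhirResetDeleteOrder)))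
      = fhirResetDeleteOrder.filter (fun y => decide (y ∈ pre ++ u))
          ++ (pre ++ u).filter (fun y => !decide (y ∈ fhirResetDeleteOrder)) := by
  induction u with
  | nil => intro pre _; simp
  | cons x u ih =>
    intro pre hnd
    have hxpre : x ∉ pre := by
      intro hmem
      exact (List.disjoint_of_nodup_append hnd) hmem (List.mem_cons_self)
    have hnd' : ((pre ++ [x]) ++ u).Nodup := by simpa [List.append_assoc] using hnd
    simp only [List.foldl_cons]
    have hstep :
        PySem.List.insertBy (fun a b => decide (fhirKey a < fhirKey b)) x
            (fhirResetDeleteOrder.filter (fun y => decide (y ∈ pre))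
              ++ pre.filter (fun y => !decide (y ∈ fhirResetDeleteOrder)))
          = fhirResetDeleteOrder.filter (fun y => decide (y ∈ pre ++ [x]))
              ++ (pre ++ [x]).filter (fun y => !decide (y ∈ fhirResetDeleteOrder)) := by
      by_cases hx : x ∈ fhirResetDeleteOrder
      · rw [fhir_ins_prio fhirResetDeleteOrder fhirOrder_pairwise
            (pre.filter (fun y => !decide (y ∈ fhirResetDeleteOrder))) x
            (by
              intro y hy
              have hym := List.mem_filter.mp hy
              have : y ∉ fhirResetDeleteOrder := by simpa using hym.2
              rw [fhirKey_eq_of_not_mem this]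
              exact fhirKey_lt_of_mem hx)
            hx (fun y => decide (y ∈ pre)) (by simp [hxpre])]
        congr 1
        · apply List.filter_congr
          intro y _
          rw [Bool.eq_iff_iff]
          simp
        · rw [List.filter_append]
          simp [hx]
      · rw [PySem.List.insertBy_of_forall_not_before]
        · rw [List.filter_append (l₂ := [x])]
          have h1 : fhirResetDeleteOrder.filter (fun y => decide (y ∈ pre ++ [x]))
              = fhirResetDeleteOrder.filter (fun y => decide (y ∈ pre)) := by
            apply List.filter_congr
            intro y hy
            have : y ≠ x := by intro he; subst he; exact hx hy
            simp [this]
          rw [h1]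
          simp [hx, List.append_assoc]
        · intro y _
          simp only [decide_eq_false_iff_not, not_lt]
          rw [fhirKey_eq_of_not_mem hx]
          exact fhirKey_le y
    rw [hstep, ih (pre ++ [x]) hnd', List.append_assoc]
    simp
-- characterization of the stable sort by fhirKey on a nodup list
theorem fhir_sorted_eq (u : List String) (hnd : u.Nodup) :
    PySem.List.sorted u fhirKey
      = fhirResetDeleteOrder.filter (fun y => decide (y ∈ u))
          ++ u.filter (fun y => !decide (y ∈ fhirResetDeleteOrder)) := by
  rw [PySem.List.sorted_eq_foldl_insertBy]
  have h0 := fhir_fold_ins u [] (by simpa using hnd)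
  simpa using h0

-- A's dedupe loop from a duplicated state is the Set.add fold over the normalized nonblank names
theorem fhir_foldA (rts : List String) : ∀ (u : PySem.Set String),
    rts.foldl fhirStepA (u, u)
      = (((rts.map fhirNorm).filter (fun n => !(n == ""))).foldl PySem.Set.add u,
         ((rts.map fhirNorm).filter (fun n => !(n == ""))).foldl PySem.Set.add u) := by
  induction rts with
  | nil => intro u; rfl
  | cons r rts ih =>
    intro u
    simp only [List.foldl_cons, List.map_cons, List.filter_cons, fhirStepA, fhirNorm]
    by_cases hb : (PySem.Str.strip (if r == "" then "" else r) == "") = true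
    · simp only [hb, Bool.true_or, if_true, Bool.not_true, Bool.false_eq_true, if_false]
      exact ih u
    · have hb' : (PySem.Str.strip (if r == "" then "" else r) == "") = false := by
        simpa using hb
      simp only [hb', Bool.false_or, Bool.not_false, if_true, List.foldl_cons]
      by_cases hc : PySem.Set.contains u (PySem.Str.strip (if r == "" then "" else r)) = true
      · have hadd : PySem.Set.add u (PySem.Str.strip (if r == "" then "" else r)) = u := by
          simp only [PySem.Set.add, hc, if_true]
        simp only [hc, if_true, hadd]
        exact ih u
      · have hcf : PySem.Set.contains u (PySem.Str.strip (if r == "" then "" else r)) = false := by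
          simp only [Bool.not_eq_true] at hc
          exact hc
        have hadd : PySem.Set.add u (PySem.Str.strip (if r == "" then "" else r))
            = u ++ [PySem.Str.strip (if r == "" then "" else r)] := by
          simp only [PySem.Set.add, hcf, Bool.false_eq_true, if_false]
        simp only [hc, Bool.false_eq_true, if_false, hadd]
        exact ih (u ++ [PySem.Str.strip (if r == "" then "" else r)])

-- ===== VERDICT (by name: the statement is the Claim_ definition above) =====
theorem order_fhir_resource_types_for_delete_py_spec : Claim_equal_order_fhir_resource_types_for_delete_py := by
  intro resource_types _
  unfold Spec_order_fhir_resource_types_for_delete_py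
  unfold order_fhir_resource_types_for_delete_py order_fhir_resource_types_for_delete_py_alt
  have hfold : resource_types.foldl fhirStepA ([], PySem.Set.empty)
      = (((resource_types.map fhirNorm).filter (fun n => !(n == ""))).foldl PySem.Set.add [],
         ((resource_types.map fhirNorm).filter (fun n => !(n == ""))).foldl PySem.Set.add []) :=
    fhir_foldA resource_types PySem.Set.empty
  rw [hfold, ← PySem.Set.ofList_eq_foldl]
  set U := PySem.Set.ofList ((resource_types.map fhirNorm).filter (fun n => !(n == ""))) with hU
  have hdedup : PySem.List.dedup ((resource_types.map fhirNorm).filter (fun n => !(n == ""))) = U := by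
    simp [hU]
  rw [hdedup, fhir_sorted_eq U (PySem.Set.nodup_ofList _)]
  by_cases hnil : U = []
  · simp [hnil]
  · have hbeq : (U == []) = false := by simp [hnil]
    simp only [hbeq, Bool.false_eq_true, if_false]
    congr 1
    · apply List.filter_congr
      intro y _
      rw [Bool.eq_iff_iff]
      simp [PySem.Set.contains]
    · apply List.filter_congr
      intro y _
      rw [Bool.eq_iff_iff]
      simp [PySem.Set.contains, PySem.Set.mem_ofList]
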